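-- pv_equiv track=rewrite | github.com/gabay/AoC2024 | 22.py | get_price_per_prefix
-- ===== SOURCE A (Python) =====
-- def mix(n: int, m: int) -> int:
--     return n ^ m
--
-- def prune(n: int) -> int:
--     return n % 16777216
--
-- def get_next_secret_number(n: int) -> int:
--     n = prune(mix(n, n * 64))
--     n = prune(mix(n, n // 32))
--     n = prune(mix(n, n * 2048))
--     return n
--
-- def get_prices_and_deltas(n: int, count: int) -> tuple[list[int], list[int]]:
--     secret_numbers = [n]
--     for _ in range(count):
--         secret_numbers.append(get_next_secret_number(secret_numbers[-1]))
--     prices = [i % 10 for i in secret_numbers]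
--     deltas = [j - i for i, j in zip(prices, prices[1:])]
--     return prices, deltas
--
-- def get_price_per_prefix(n: int, count: int) -> dict[tuple[int, int, int, int], int]:
--     prices, deltas = get_prices_and_deltas(n, count)
--     price_per_prefix = {}
--     for i, price in enumerate(prices[4:], 4):
--         prefix = tuple(deltas[i - 4 : i])
--         if prefix not in price_per_prefix:
--             price_per_prefix[prefix] = price
--     return price_per_prefix
-- ===== SOURCE B (Python) =====
-- def _next(secret: int) -> int:
--     secret = (secret ^ (secret * 64)) % 16777216
--     secret = (secret ^ (secret // 32)) % 16777216
--     return (secret ^ (secret * 2048)) % 16777216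
--
--
-- def get_price_per_prefix(n: int, count: int) -> dict[tuple[int, int, int, int], int]:
--     out = {}
--     secret = n
--     prev = n % 10
--     window = ()
--     for _ in range(count):
--         secret = _next(secret)
--         price = secret % 10
--         window = (window + (price - prev,))[-4:]
--         if len(window) == 4:
--             out.setdefault(window, price)
--         prev = price
--     return out
-- ===== Notes on version B (the rewrite author's own statement) =====
-- stated objective: alternative
-- what changed: Replaced A's three-list pipeline (build the full secret-number list, then a prices list, then a deltas list, then index/slice into them) by a single streaming loop that keeps only the current secret, the previous price and a rolling window of the last four deltas, inserting via setdefault the first time each window is seen.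
import Mathlib
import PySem

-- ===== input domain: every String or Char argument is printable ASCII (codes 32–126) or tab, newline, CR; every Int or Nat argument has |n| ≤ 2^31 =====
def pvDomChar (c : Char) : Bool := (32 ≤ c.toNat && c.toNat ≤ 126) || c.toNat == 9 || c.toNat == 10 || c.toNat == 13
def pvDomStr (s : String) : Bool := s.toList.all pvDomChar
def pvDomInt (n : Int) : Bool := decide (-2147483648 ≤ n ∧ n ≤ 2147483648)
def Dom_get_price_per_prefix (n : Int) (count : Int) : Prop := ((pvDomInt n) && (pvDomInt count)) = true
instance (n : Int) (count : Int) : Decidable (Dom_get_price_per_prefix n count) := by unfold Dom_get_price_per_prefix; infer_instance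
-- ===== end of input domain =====

-- B replaces A's three-list pipeline by one streaming loop with a rolling 4-delta window (same cost, different decomposition); both are total, so no Pre_.

-- ===== PORT A =====
def pvMix (n m : Int) : Int := PySem.Int.bxor n m

def pvPrune (n : Int) : Int := PySem.Int.mod n 16777216

def pvGetNextSecretNumber (n : Int) : Int :=
  let n1 := pvPrune (pvMix n (n * 64))
  let n2 := pvPrune (pvMix n1 (PySem.Int.floordiv n1 32))
  pvPrune (pvMix n2 (n2 * 2048))

def pvGetPricesAndDeltas (n : Int) (count : Int) : List Int × List Int :=
  let secret_numbers :=
    (PySem.List.pyRange 0 count 1).foldl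
      (fun acc _ => acc ++ [pvGetNextSecretNumber (PySem.List.pyGetD acc (-1) 0)]) [n]
  let prices := secret_numbers.map (fun i => PySem.Int.mod i 10)
  let deltas := (prices.zip (PySem.List.slice prices (some 1) none)).map (fun p => p.2 - p.1)
  (prices, deltas)

def get_price_per_prefix (n : Int) (count : Int) : List (Int × Int × Int × Int × Int) :=
  let pd := pvGetPricesAndDeltas n count
  let prices := pd.1
  let deltas := pd.2
  let d :=
    (PySem.List.enumerate (PySem.List.slice prices (some 4) none) 4).foldl
      (fun (acc : PySem.Dict (Int × Int × Int × Int) Int) ip =>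
        let i := ip.1
        let price := ip.2
        let pre := PySem.List.slice deltas (some (i - 4)) (some i)
        let pfx := (PySem.List.pyGetD pre 0 0, PySem.List.pyGetD pre 1 0,
                    PySem.List.pyGetD pre 2 0, PySem.List.pyGetD pre 3 0)
        if acc.contains pfx then acc else acc.insert pfx price)
      PySem.Dict.empty
  d.items.map (fun p => (p.1.1, p.1.2.1, p.1.2.2.1, p.1.2.2.2, p.2))

-- ===== PORT B =====
-- Source B's _next helper: the three in-place secret updates
def pvAltNext (secret : Int) : Int :=
  let s1 := PySem.Int.mod (PySem.Int.bxor secret (secret * 64)) 16777216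
  let s2 := PySem.Int.mod (PySem.Int.bxor s1 (PySem.Int.floordiv s1 32)) 16777216
  PySem.Int.mod (PySem.Int.bxor s2 (s2 * 2048)) 16777216

-- Source B's streaming loop: fuel = number of remaining iterations of `for _ in range(count)`
def pvAltGo (fuel : Nat) (secret prev : Int) (window : List Int)
    (out : PySem.Dict (Int × Int × Int × Int) Int) : PySem.Dict (Int × Int × Int × Int) Int :=
  match fuel with
  | 0 => out
  | k + 1 =>
    let s := pvAltNext secret
    let price := PySem.Int.mod s 10
    let w := PySem.List.slice (window ++ [price - prev]) (some (-4)) none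
    let out' :=
      if w.length == 4 then
        out.setdefault (PySem.List.pyGetD w 0 0, PySem.List.pyGetD w 1 0,
                        PySem.List.pyGetD w 2 0, PySem.List.pyGetD w 3 0) price
      else out
    pvAltGo k s price w out'

def get_price_per_prefix_alt (n : Int) (count : Int) : List (Int × Int × Int × Int × Int) :=
  (pvAltGo count.toNat n (PySem.Int.mod n 10) [] PySem.Dict.empty).items.map
    (fun p => (p.1.1, p.1.2.1, p.1.2.2.1, p.1.2.2.2, p.2))

-- ===== PRECONDITION & SPEC =====
def Spec_get_price_per_prefix (n : Int) (count : Int) (out : List (Int × Int × Int × Int × Int)) : Prop := out = get_price_per_prefix_alt n count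
instance (n : Int) (count : Int) (out : List (Int × Int × Int × Int × Int)) : Decidable (Spec_get_price_per_prefix n count out) := by unfold Spec_get_price_per_prefix; infer_instance

-- ===== CLAIM (what is proved, stated in full; the proofs are below) =====
def Claim_equal_get_price_per_prefix : Prop := ∀ (n : Int) (count : Int), Dom_get_price_per_prefix n count → Spec_get_price_per_prefix n count (get_price_per_prefix n count)

-- ===== LEMMAS AND PROOFS =====

-- the k-th secret number, price, delta, window key, and the dict both loops build
def pvSec (n : Int) : Nat → Int
  | 0 => n
  | k + 1 => pvGetNextSecretNumber (pvSec n k)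

def pvP (n : Int) (k : Nat) : Int := PySem.Int.mod (pvSec n k) 10

def pvD (n : Int) (k : Nat) : Int := pvP n (k + 1) - pvP n k

def pvKey (n : Int) (k : Nat) : Int × Int × Int × Int :=
  (pvD n k, pvD n (k + 1), pvD n (k + 2), pvD n (k + 3))

def pvBuild (n : Int) : Nat → PySem.Dict (Int × Int × Int × Int) Int
  | 0 => PySem.Dict.empty
  | m + 1 => (pvBuild n m).setdefault (pvKey n m) (pvP n (m + 4))

-- window of the last ≤4 deltas after j iterations of B's loop
def pvW (n : Int) (j : Nat) : List Int := ((List.range j).drop (j - 4)).map (pvD n)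

theorem pv_get0 (a b c d e : Int) : PySem.List.pyGetD [a, b, c, d] 0 e = a := by
  simp [PySem.List.pyGetD, PySem.List.pyGet?, PySem.List.pyIdx?]

theorem pv_get1 (a b c d e : Int) : PySem.List.pyGetD [a, b, c, d] 1 e = b := by
  simp [PySem.List.pyGetD, PySem.List.pyGet?, PySem.List.pyIdx?]

theorem pv_get2 (a b c d e : Int) : PySem.List.pyGetD [a, b, c, d] 2 e = c := by
  simp [PySem.List.pyGetD, PySem.List.pyGet?, PySem.List.pyIdx?]

theorem pv_get3 (a b c d e : Int) : PySem.List.pyGetD [a, b, c, d] 3 e = d := by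
  simp [PySem.List.pyGetD, PySem.List.pyGet?, PySem.List.pyIdx?]

theorem pv_foldl_const {α β : Type} (g : β → β) (l : List α) (a : β) :
    l.foldl (fun acc _ => g acc) a = g^[l.length] a := by
  induction l generalizing a with
  | nil => rfl
  | cons x xs ih => simp [List.foldl, ih, Function.iterate_succ_apply]

theorem pv_iter_secrets (n : Int) (m : Nat) :
    (fun acc => acc ++ [pvGetNextSecretNumber (PySem.List.pyGetD acc (-1) 0)])^[m] [n]
      = (List.range (m + 1)).map (pvSec n) := by
  induction m with
  | zero => simp [pvSec]
  | succ m ih =>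
    rw [Function.iterate_succ_apply', ih]
    rw [List.range_succ (n := m + 1), List.map_append]
    rw [List.range_succ (n := m), List.map_append]
    simp [PySem.List.pyGetD_neg_one_append_singleton, pvSec]

theorem pv_prices (n : Int) (count : Int) :
    (pvGetPricesAndDeltas n count).1 = (List.range (count.toNat + 1)).map (pvP n) := by
  unfold pvGetPricesAndDeltas
  simp only []
  rw [pv_foldl_const, PySem.List.length_pyRange_one]
  have : (count - 0).toNat = count.toNat := by omega
  rw [this, pv_iter_secrets, List.map_map]
  rfl

theorem pv_deltas (n : Int) (count : Int) :
    (pvGetPricesAndDeltas n count).2 = (List.range count.toNat).map (pvD n) := by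
  unfold pvGetPricesAndDeltas
  simp only []
  rw [pv_foldl_const, PySem.List.length_pyRange_one]
  have h0 : (count - 0).toNat = count.toNat := by omega
  rw [h0, pv_iter_secrets, List.map_map, PySem.List.slice_from_one]
  apply List.ext_getElem
  · simp
  · intro i h1 h2
    simp only [List.getElem_map, List.getElem_zip, List.getElem_tail, List.getElem_range]
    simp [pvD, pvP]

theorem pv_range_drop_take (m c : Nat) (h : m + 4 ≤ c) :
    ((List.range c).drop m).take 4 = [m, m + 1, m + 2, m + 3] := by
  apply List.ext_getElem
  · simp; omega
  · intro i h1 h2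
    simp only [List.getElem_take, List.getElem_drop, List.getElem_range]
    simp at h2
    interval_cases i <;> simp

theorem pv_range_drop (m c : Nat) (h : m + 4 = c) :
    (List.range c).drop m = [m, m + 1, m + 2, m + 3] := by
  rw [← pv_range_drop_take m c (by omega)]
  rw [List.take_of_length_le (by simp; omega)]

theorem pv_drop4 (c : Nat) :
    (List.range (c + 1)).drop 4 = (List.range (c + 1 - 4)).map (fun x => 4 + x) := by
  rcases Nat.lt_or_ge c 3 with h | h
  · rw [List.drop_eq_nil_of_le (by simp; omega), show c + 1 - 4 = 0 from by omega]
    simp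
  · obtain ⟨k, hk⟩ : ∃ k, c + 1 = 4 + k := ⟨c - 3, by omega⟩
    rw [hk, List.range_add, show 4 + k - 4 = k from by omega]
    rw [List.drop_append_of_le_length (by simp)]
    simp

-- the A-side fold over enumerate equals pvBuild
theorem pv_A_fold (n : Int) (c : Nat) (m : Nat) (h : m ≤ c - 3) :
    (PySem.List.enumerate ((List.range m).map (fun k => pvP n (k + 4))) 4).foldl
      (fun (acc : PySem.Dict (Int × Int × Int × Int) Int) ip =>
        let i := ip.1
        let price := ip.2
        let pre := PySem.List.slice ((List.range c).map (pvD n)) (some (i - 4)) (some i)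
        let pfx := (PySem.List.pyGetD pre 0 0, PySem.List.pyGetD pre 1 0,
                    PySem.List.pyGetD pre 2 0, PySem.List.pyGetD pre 3 0)
        if acc.contains pfx then acc else acc.insert pfx price)
      PySem.Dict.empty = pvBuild n m := by
  induction m with
  | zero => simp [pvBuild, PySem.List.enumerate_nil]
  | succ m ih =>
    rw [List.range_succ, List.map_append, PySem.List.enumerate_append, List.foldl_append]
    rw [ih (by omega)]
    simp only [List.map_cons, List.map_nil, List.length_map, List.length_range,
      PySem.List.enumerate_cons, PySem.List.enumerate_nil, List.foldl_cons, List.foldl_nil]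
    have hi : (4 : Int) + (m : Int) - 4 = ((m : Nat) : Int) := by omega
    have hi2 : (4 : Int) + (m : Int) = ((m : Nat) : Int) + ((4 : Nat) : Int) := by push_cast; ring
    rw [hi, hi2, PySem.List.slice_natCast_add, ← List.map_drop, ← List.map_take,
      pv_range_drop_take m c (by omega)]
    dsimp only [List.map_cons, List.map_nil]
    have hkey : (pvD n m, pvD n (m + 1), pvD n (m + 2), pvD n (m + 3)) = pvKey n m := rfl
    simp only [pv_get0, pv_get1, pv_get2, pv_get3, hkey]
    rw [pvBuild]
    by_cases hc : (pvBuild n m).contains (pvKey n m) = true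
    · rw [if_pos hc, PySem.Dict.setdefault_of_contains _ _ hc]
    · rw [if_neg hc, PySem.Dict.setdefault_of_not_contains _ _ (by simpa using hc)]

theorem pv_A_dict (n : Int) (count : Int) :
    get_price_per_prefix n count
      = (pvBuild n (count.toNat - 3)).items.map
          (fun p => (p.1.1, p.1.2.1, p.1.2.2.1, p.1.2.2.2, p.2)) := by
  unfold get_price_per_prefix
  simp only [pv_prices, pv_deltas]
  rw [PySem.List.slice_from _ (by norm_num)]
  rw [show ((4 : Int)).toNat = 4 from rfl]
  rw [← List.map_drop, pv_drop4 count.toNat, List.map_map]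
  rw [show count.toNat + 1 - 4 = count.toNat - 3 from by omega]
  have hcomp : ((pvP n) ∘ (fun x => 4 + x)) = (fun k => pvP n (k + 4)) := by
    funext k
    simp [Function.comp, Nat.add_comm]
  rw [hcomp]
  exact congrArg
    (fun d : PySem.Dict (Int × Int × Int × Int) Int =>
      d.items.map (fun p => (p.1.1, p.1.2.1, p.1.2.2.1, p.1.2.2.2, p.2)))
    (pv_A_fold n count.toNat (count.toNat - 3) (le_refl _))

theorem pv_W_succ (n : Int) (j : Nat) :
    PySem.List.slice (pvW n j ++ [pvD n j]) (some (-4)) none = pvW n (j + 1) := by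
  have h1 : pvW n j ++ [pvD n j] = ((List.range (j + 1)).drop (j - 4)).map (pvD n) := by
    unfold pvW
    rw [List.range_succ, List.drop_append_of_le_length (by simp)]
    simp
  rw [h1, PySem.List.slice_from_neg_ofNat _ 4 (by norm_num)]
  rw [List.length_map, List.length_drop, List.length_range]
  rw [← List.map_drop, List.drop_drop]
  unfold pvW
  congr 2
  omega

theorem pv_B_go (n : Int) (r : Nat) :
    ∀ j : Nat, pvAltGo r (pvSec n j) (pvP n j) (pvW n j) (pvBuild n (j - 3))
      = pvBuild n ((j + r) - 3) := by
  induction r with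
  | zero => intro j; simp [pvAltGo]
  | succ r ih =>
    intro j
    simp only [pvAltGo]
    rw [show pvAltNext (pvSec n j) = pvSec n (j + 1) from rfl]
    rw [show PySem.Int.mod (pvSec n (j + 1)) 10 = pvP n (j + 1) from rfl]
    rw [show pvP n (j + 1) - pvP n j = pvD n j from rfl]
    rw [pv_W_succ]
    by_cases hj : 3 ≤ j
    · have hw : pvW n (j + 1) = [pvD n (j - 3), pvD n (j - 2), pvD n (j - 1), pvD n j] := by
        unfold pvW
        rw [show j + 1 - 4 = j - 3 from by omega, pv_range_drop (j - 3) (j + 1) (by omega)]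
        simp [show j - 3 + 1 = j - 2 from by omega, show j - 3 + 2 = j - 1 from by omega,
          show j - 3 + 3 = j from by omega]
      rw [hw]
      simp only [List.length_cons, List.length_nil]
      rw [if_pos (by norm_num)]
      rw [pv_get0, pv_get1, pv_get2, pv_get3]
      have hkey : (pvD n (j - 3), pvD n (j - 2), pvD n (j - 1), pvD n j) = pvKey n (j - 3) := by
        unfold pvKey
        rw [show j - 3 + 1 = j - 2 from by omega, show j - 3 + 2 = j - 1 from by omega,
          show j - 3 + 3 = j from by omega]
      rw [hkey, show pvP n (j + 1) = pvP n ((j - 3) + 4) from by rw [show (j - 3) + 4 = j + 1 from by omega]]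
      rw [show (pvBuild n (j - 3)).setdefault (pvKey n (j - 3)) (pvP n ((j - 3) + 4))
            = pvBuild n ((j - 3) + 1) from rfl]
      rw [show (j - 3) + 1 = (j + 1) - 3 from by omega]
      rw [← hw]
      have := ih (j + 1)
      rw [show (j + 1) + r - 3 = j + (r + 1) - 3 from by omega] at this
      rw [show pvP n ((j - 3) + 4) = pvP n (j + 1) from by rw [show (j - 3) + 4 = j + 1 from by omega]]
      exact this
    · have hlen : (pvW n (j + 1)).length = j + 1 := by
        simp [pvW]
        omega
      rw [if_neg (by simp [hlen]; omega)]
      rw [show j - 3 = (j + 1) - 3 from by omega]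
      have := ih (j + 1)
      rw [show (j + 1) + r - 3 = j + (r + 1) - 3 from by omega] at this
      exact this

theorem pv_eq (n : Int) (count : Int) :
    get_price_per_prefix n count = get_price_per_prefix_alt n count := by
  rw [pv_A_dict]
  unfold get_price_per_prefix_alt
  have h : pvAltGo count.toNat n (PySem.Int.mod n 10) [] PySem.Dict.empty
      = pvBuild n ((0 + count.toNat) - 3) := pv_B_go n count.toNat 0
  rw [show (0 + count.toNat) - 3 = count.toNat - 3 from by omega] at h
  exact congrArg
    (fun d : PySem.Dict (Int × Int × Int × Int) Int =>
      d.items.map (fun p => (p.1.1, p.1.2.1, p.1.2.2.1, p.1.2.2.2, p.2)))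
    h.symm

-- ===== VERDICT (by name: the statement is the Claim_ definition above) =====
theorem get_price_per_prefix_spec : Claim_equal_get_price_per_prefix := by
  intro n count _
  show get_price_per_prefix n count = get_price_per_prefix_alt n count
  exact pv_eq n count
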